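-- pv_equiv track=rewrite | github.com/LiuDongzhe/pythonProject | mahjong/rules.py | pengCheck
-- ===== SOURCE A (Python) =====
-- def pengCheck(hand):
--     # 碰牌检查
--     if len(hand) % 3 != 0:
--         return False
--
--     # 统计每种牌的数量
--     count = {}
--     for tile in hand:
--         if tile not in count:
--             count[tile] = 1
--         else:
--             count[tile] += 1
--
--     # 判断是否有三张相同的牌
--     for num in count.values():
--         if num == 3:
--             return True
--
--     return False
-- ===== SOURCE B (Python) =====
-- def pengCheck(hand):
--     if len(hand) % 3 != 0:
--         return False
--     s = sorted(hand)
--     if not s: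
--         return False
--     run_val = s[0]
--     run_len = 1
--     for x in s[1:]:
--         if x == run_val:
--             run_len += 1
--         else:
--             if run_len == 3:
--                 return True
--             run_val = x
--             run_len = 1
--     return run_len == 3
-- ===== Notes on version B (the rewrite author's own statement) =====
-- stated objective: alternative
-- what changed: Replaces the dict-counting pass plus a scan over counts by sort-then-scan: one pass over sorted(hand) tracking the current run, returning True on a run of length exactly 3.
import Mathlib
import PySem

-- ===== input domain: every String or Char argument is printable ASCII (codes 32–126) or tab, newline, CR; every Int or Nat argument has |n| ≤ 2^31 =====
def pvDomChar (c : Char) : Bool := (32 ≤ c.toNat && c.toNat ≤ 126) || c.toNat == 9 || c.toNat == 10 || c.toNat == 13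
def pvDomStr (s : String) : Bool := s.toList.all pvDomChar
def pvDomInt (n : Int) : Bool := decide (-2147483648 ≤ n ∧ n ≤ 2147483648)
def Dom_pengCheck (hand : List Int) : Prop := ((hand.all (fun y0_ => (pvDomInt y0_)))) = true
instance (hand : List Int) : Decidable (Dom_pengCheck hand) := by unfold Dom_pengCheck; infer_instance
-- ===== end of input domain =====

-- B replaces A's dict-counting pass by sort-then-scan-runs (an alternative algorithm of similar cost).

-- ===== PORT A =====
def pengCheck (hand : List Int) : Bool :=
  if hand.length % 3 ≠ 0 then false
  else
    let count := hand.foldl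
      (fun d tile =>
        if d.contains tile = false then d.insert tile 1
        else d.insert tile (d.getD tile 0 + 1))
      (PySem.Dict.empty : PySem.Dict Int Int)
    count.values.any (fun num => num == 3)

-- ===== PORT B =====
-- the scan over the tail of the sorted hand: state = current run's value and length
def pengRunScan : Int → Int → List Int → Bool
  | _, k, [] => k == 3
  | v, k, x :: xs =>
    if x == v then pengRunScan v (k + 1) xs
    else if k == 3 then true
    else pengRunScan x 1 xs

def pengCheck_alt (hand : List Int) : Bool :=
  if hand.length % 3 ≠ 0 then false
  else
    match PySem.List.sorted hand (fun x => x) false with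
    | [] => false
    | x :: xs => pengRunScan x 1 xs

-- ===== PRECONDITION & SPEC =====
def Spec_pengCheck (hand : List Int) (out : Bool) : Prop := out = pengCheck_alt hand
instance (hand : List Int) (out : Bool) : Decidable (Spec_pengCheck hand out) := by unfold Spec_pengCheck; infer_instance

-- ===== CLAIM (what is proved, stated in full; the proofs are below) =====
def Claim_equal_pengCheck : Prop := ∀ (hand : List Int), Dom_pengCheck hand → Spec_pengCheck hand (pengCheck hand)

-- ===== LEMMAS AND PROOFS =====

-- A's counting loop is exactly PySem's counter
theorem pengCheck_foldl_counter (hand : List Int) :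
    hand.foldl
      (fun d tile =>
        if d.contains tile = false then d.insert tile 1
        else d.insert tile (d.getD tile 0 + 1))
      (PySem.Dict.empty : PySem.Dict Int Int) = PySem.Dict.counter hand := by
  rw [← PySem.Dict.foldl_insert_getD_add_one_eq_counter]
  congr 1
  funext d t
  by_cases h : d.contains t
  · simp [h]
  · have : d.getD t 0 = 0 := PySem.Dict.getD_of_not_contains d 0 (by simpa using h)
    simp [h, this]

-- A returns true iff the hand size is divisible by 3 and some tile occurs exactly three times
theorem pengCheck_char (hand : List Int) :
    pengCheck hand = true ↔
      (hand.length % 3 = 0 ∧ ∃ w ∈ hand, hand.count w = 3) := by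
  unfold pengCheck
  by_cases h3 : hand.length % 3 = 0
  · simp only [h3, ne_eq, not_true_eq_false, if_neg, not_false_eq_true]
    simp only [pengCheck_foldl_counter]
    rw [PySem.Dict.values_eq_map_keys _ (PySem.Dict.nodup_keys_counter hand) 0, PySem.Dict.keys_counter]
    simp only [List.any_map, List.any_eq_true, PySem.Set.mem_ofList, PySem.Dict.getD_counter,
      Function.comp, beq_iff_eq, true_and]
    constructor <;> (rintro ⟨w, hw, hc⟩; exact ⟨w, hw, by exact_mod_cast hc⟩)
  · simp [h3]

-- the run scan over a sorted tail, started with run (v, k), finds a run of length exactly 3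
-- iff k completes to 3 with the copies of v ahead, or some later value occurs exactly 3 times
theorem pengRunScan_spec (xs : List Int) : ∀ (v k : Int),
    (v :: xs).Pairwise (· ≤ ·) →
    (pengRunScan v k xs = true ↔
      (k + (xs.count v : Int) = 3 ∨ ∃ w ∈ xs, w ≠ v ∧ (xs.count w : Int) = 3)) := by
  induction xs with
  | nil =>
    intro v k _
    simp [pengRunScan]
  | cons a l ih =>
    intro v k h
    by_cases hav : a = v
    · subst hav
      have h' : (a :: l).Pairwise (· ≤ ·) := h.tail
      rw [pengRunScan]
      simp only [beq_self_eq_true, if_true]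
      rw [ih a (k + 1) h']
      simp only [List.count_cons_self, List.mem_cons]
      constructor
      · rintro (hc | ⟨w, hw, hwv, hc⟩)
        · left; omega
        · right; exact ⟨w, Or.inr hw, hwv, by simp [Ne.symm hwv, hc]⟩
      · rintro (hc | ⟨w, hw, hwv, hc⟩)
        · left; omega
        · rcases hw with rfl | hw
          · exact absurd rfl hwv
          · right; exact ⟨w, hw, hwv, by simp [Ne.symm hwv] at hc; exact_mod_cast hc⟩
    · -- a ≠ v: v is strictly below everything remaining, so its run is over
      have hva : v ≤ a := (List.pairwise_cons.mp h).1 a List.mem_cons_self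
      have hvlt : v < a := lt_of_le_of_ne hva (fun e => hav e.symm)
      have hall : ∀ b ∈ l, a ≤ b := fun b hb => (List.pairwise_cons.mp h.tail).1 b hb
      have hvgt : ∀ b ∈ a :: l, v < b := by
        intro b hb
        rcases hb with _ | hb
        · exact hvlt
        · exact lt_of_lt_of_le hvlt (hall _ (by assumption))
      have hcv : (a :: l).count v = 0 := by
        rw [List.count_eq_zero]
        intro hv; exact absurd rfl (ne_of_gt (hvgt v hv))
      rw [pengRunScan]
      rw [if_neg (by simpa using hav)]
      have h' : (a :: l).Pairwise (· ≤ ·) := h.tail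
      by_cases hk : k = 3
      · subst hk
        simp [hcv]
      · rw [if_neg (by simpa using hk)]
        rw [ih a 1 h']
        rw [hcv]
        constructor
        · rintro (hc | ⟨w, hw, hwa, hc⟩)
          · right
            exact ⟨a, List.mem_cons_self, ne_of_gt hvlt, by rw [List.count_cons_self]; push_cast; omega⟩
          · right
            exact ⟨w, List.mem_cons_of_mem _ hw, ne_of_gt (hvgt w (List.mem_cons_of_mem _ hw)),
              by simp [Ne.symm hwa, hc]⟩
        · rintro (hc | ⟨w, hw, hwv, hc⟩)
          · push_cast at hc; omega
          · rcases List.mem_cons.mp hw with rfl | hw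
            · left; rw [List.count_cons_self] at hc; push_cast at hc ⊢; omega
            · by_cases hwa : w = a
              · subst hwa; left; rw [List.count_cons_self] at hc; push_cast at hc ⊢; omega
              · right; exact ⟨w, hw, hwa, by simp [Ne.symm hwa] at hc; exact_mod_cast hc⟩

-- B returns true iff the hand size is divisible by 3 and some tile occurs exactly three times
theorem pengCheck_alt_char (hand : List Int) :
    pengCheck_alt hand = true ↔
      (hand.length % 3 = 0 ∧ ∃ w ∈ hand, hand.count w = 3) := by
  unfold pengCheck_alt
  by_cases h3 : hand.length % 3 = 0
  · simp only [h3, ne_eq, not_true_eq_false, if_neg, not_false_eq_true, true_and]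
    rcases hs : PySem.List.sorted hand (fun x => x) false with _ | ⟨x, xs⟩
    · have : hand = [] := (PySem.List.sorted_eq_nil_iff hand _ false).mp hs
      subst this; simp
    · have hperm : (x :: xs).Perm hand := hs ▸ PySem.List.sorted_perm hand (fun x => x) false
      have hpw : (x :: xs).Pairwise (· ≤ ·) := by
        have := PySem.List.sorted_pairwise hand (fun x => x)
        rw [hs] at this; exact this
      rw [pengRunScan_spec xs x 1 hpw]
      constructor
      · rintro (hc | ⟨w, hw, hwx, hc⟩)
        · refine ⟨x, hperm.mem_iff.mp List.mem_cons_self, ?_⟩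
          rw [← hperm.count_eq, List.count_cons_self]; push_cast at hc ⊢; omega
        · refine ⟨w, hperm.mem_iff.mp (List.mem_cons_of_mem _ hw), ?_⟩
          rw [← hperm.count_eq]; simp [Ne.symm hwx] at hc ⊢; exact_mod_cast hc
      · rintro ⟨w, hw, hc⟩
        rw [← hperm.count_eq w] at hc
        by_cases hwx : w = x
        · subst hwx; left; rw [List.count_cons_self] at hc; omega
        · right
          have hwmem : w ∈ x :: xs := hperm.mem_iff.mpr hw
          rcases List.mem_cons.mp hwmem with rfl | hwm
          · exact absurd rfl hwx
          · exact ⟨w, hwm, hwx, by simp [Ne.symm hwx] at hc; exact_mod_cast hc⟩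
  · simp [h3]

-- ===== VERDICT (by name: the statement is the Claim_ definition above) =====
theorem pengCheck_spec : Claim_equal_pengCheck := by
  intro hand _
  unfold Spec_pengCheck
  rw [Bool.eq_iff_iff, pengCheck_char, pengCheck_alt_char]
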